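-- pv_equiv track=rewrite | github.com/arthurzengg/coding_q | leetcode_q/Stack/lc484.py | findPermutation
-- ===== SOURCE A (Python) =====
-- from typing import List
--
-- def findPermutation(s: str) -> List[int]:
--     n = len(s)
--     res = [i for i in range(1, n + 2)]
--     i = 0
--
--     while i < n:
--         if s[i] == 'D':
--             right = i
--             while right < n and s[right] == 'D':
--                 right += 1
--             res[i: right + 1] = res[i: right + 1][::-1]
--             i = right
--         else:
--             i += 1
--
--     return res
-- ===== SOURCE B (Python) =====
-- def findPermutation(s):
--     n = len(s)
--     res = []
--     stack = []
--     for i in range(n + 1):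
--         stack.append(i + 1)
--         if i == n or s[i] != 'D':
--             while stack:
--                 res.append(stack.pop())
--     return res
-- ===== Notes on version B (the rewrite author's own statement) =====
-- stated objective: idiomatic
-- what changed: Replaced A's two-pointer scan with in-place slice reversal of each descending run by a single forward pass that pushes i+1 on an explicit stack and flushes it into the result at every non-'D' position and at the end.
import Mathlib
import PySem

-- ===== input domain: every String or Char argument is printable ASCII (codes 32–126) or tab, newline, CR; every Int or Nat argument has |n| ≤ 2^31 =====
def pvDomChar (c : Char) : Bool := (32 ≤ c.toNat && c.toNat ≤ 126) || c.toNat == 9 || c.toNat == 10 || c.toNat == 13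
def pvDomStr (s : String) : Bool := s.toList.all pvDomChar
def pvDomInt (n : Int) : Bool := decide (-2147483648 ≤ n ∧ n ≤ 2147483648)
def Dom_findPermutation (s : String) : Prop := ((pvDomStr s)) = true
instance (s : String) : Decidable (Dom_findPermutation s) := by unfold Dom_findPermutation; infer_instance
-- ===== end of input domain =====

-- B replaces A's in-place segment reversals (two-pointer run scan + slice assignment) by a single
-- forward pass with an explicit stack that is flushed at each non-'D' position and at the end
-- (objective: idiomatic/alternative; same O(n) cost).

-- ===== PORT A =====

-- inner while: `while right < n and s[right] == 'D': right += 1`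
-- (s[right] is in range by the guard, so List.getD is exact here)
def scanRight (cs : List Char) (n : Nat) (right : Nat) : Nat :=
  if h : right < n ∧ cs.getD right ' ' = 'D' then scanRight cs n (right + 1) else right
termination_by n - right
decreasing_by omega

-- termination facts for the outer while loop (`i = right` strictly advances)
theorem scanRight_ge (cs : List Char) (n r : Nat) : r ≤ scanRight cs n r := by
  rw [scanRight]
  split
  · have := scanRight_ge cs n (r + 1); omega
  · exact le_rfl
termination_by n - r
decreasing_by omega

theorem scanRight_gt (cs : List Char) (n i : Nat) (h1 : i < n) (h2 : cs.getD i ' ' = 'D') :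
    i < scanRight cs n i := by
  rw [scanRight]
  rw [dif_pos ⟨h1, h2⟩]
  have := scanRight_ge cs n (i + 1); omega

-- outer while loop of A; `res[i:right+1] = res[i:right+1][::-1]` is ported as
-- res[:i] ++ reverse (res[i:right+1]) ++ res[right+1:] (Python list slice assignment;
-- `[::-1]` is List.reverse by PySem.List.slice?_none_none_neg_one)
def loopA (cs : List Char) (n : Nat) (res : List Int) (i : Nat) : List Int :=
  if h : i < n then
    if hd : cs.getD i ' ' = 'D' then
      let right := scanRight cs n i
      let res' := PySem.List.slice res none (some (i : Int)) ++
        (PySem.List.slice res (some (i : Int)) (some ((right + 1 : Nat) : Int))).reverse ++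
        PySem.List.slice res (some ((right + 1 : Nat) : Int)) none
      loopA cs n res' right
    else
      loopA cs n res (i + 1)
  else res
termination_by n - i
decreasing_by
  · have := scanRight_gt cs n i h hd; omega
  · omega

def findPermutation (s : String) : List Int :=
  let cs := s.toList
  let n := cs.length
  -- res = [i for i in range(1, n + 2)]
  let res := PySem.List.pyRange 1 ((n + 2 : Nat) : Int) 1
  loopA cs n res 0

-- ===== PORT B =====

-- `while stack: res.append(stack.pop())` — the stack's top is the list head here
def popAll (res : List Int) : List Int → List Int
  | [] => res
  | x :: rest => popAll (res ++ [x]) rest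

-- one iteration of B's for-loop: push i+1, flush on `i == n or s[i] != 'D'`
def stepB (cs : List Char) (n : Nat) (st : List Int × List Int) (i : Nat) : List Int × List Int :=
  let stack := ((i : Int) + 1) :: st.2
  if i = n ∨ cs.getD i ' ' ≠ 'D' then (popAll st.1 stack, []) else (st.1, stack)

def findPermutation_alt (s : String) : List Int :=
  let cs := s.toList
  let n := cs.length
  ((List.range (n + 1)).foldl (stepB cs n) ([], [])).1

-- ===== PRECONDITION & SPEC =====
def Spec_findPermutation (s : String) (out : List Int) : Prop := out = findPermutation_alt s
instance (s : String) (out : List Int) : Decidable (Spec_findPermutation s out) := by unfold Spec_findPermutation; infer_instance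

-- ===== CLAIM (what is proved, stated in full; the proofs are below) =====
def Claim_equal_findPermutation : Prop := ∀ (s : String), Dom_findPermutation s → Spec_findPermutation s (findPermutation s)

-- ===== LEMMAS AND PROOFS =====

-- number of leading 'D' characters
def leadD : List Char → Nat
  | [] => 0
  | c :: rest => if c = 'D' then leadD rest + 1 else 0

theorem leadD_le (l : List Char) : leadD l ≤ l.length := by
  induction l with
  | nil => simp [leadD]
  | cons c rest ih =>
    simp only [leadD, List.length_cons]
    split
    · exact Nat.succ_le_succ ih
    · exact Nat.zero_le _

def mapInt (l : List Nat) : List Int := List.map (fun j : Nat => (j : Int)) l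

theorem length_mapInt (l : List Nat) : (mapInt l).length = l.length := by simp [mapInt]

-- the reversed block of values k+d, k+d-1, …, k
def seg (k d : Nat) : List Int := (mapInt (List.range' k (d + 1))).reverse

-- common reference function: output of both programs on the char suffix, next value k
def g (k : Nat) (cs : List Char) : List Int :=
  if leadD cs = cs.length then seg k (leadD cs)
  else seg k (leadD cs) ++ g (k + leadD cs + 1) (cs.drop (leadD cs + 1))
termination_by cs.length
decreasing_by
  have := leadD_le cs
  simp only [List.length_drop]
  omega

-- the identity suffix [k+1, …, n+1] of A's res array
def idSeg (k n : Nat) : List Int := mapInt (List.range' (k + 1) (n + 1 - k))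

theorem leadD_all_D (l : List Char) (j : Nat) (hj : j < leadD l) : l.getD j ' ' = 'D' := by
  induction l generalizing j with
  | nil => simp [leadD] at hj
  | cons c rest ih =>
    simp only [leadD] at hj
    split at hj
    · cases j with
      | zero => simpa
      | succ j => exact ih j (by omega)
    · omega

theorem leadD_stop (l : List Char) (h : leadD l < l.length) : l.getD (leadD l) ' ' ≠ 'D' := by
  induction l with
  | nil => simp at h
  | cons c rest ih =>
    by_cases hc : c = 'D'
    · have hl : leadD (c :: rest) = leadD rest + 1 := by simp [leadD, hc]
      rw [hl]
      have h' : leadD rest < rest.length := by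
        rw [hl] at h; simpa using h
      simpa using ih h'
    · have hl : leadD (c :: rest) = 0 := by simp [leadD, hc]
      rw [hl]
      simpa using hc

theorem leadD_eq (l : List Char) (d : Nat) (hd : d ≤ l.length)
    (hall : ∀ j, j < d → l.getD j ' ' = 'D')
    (hstop : d = l.length ∨ l.getD d ' ' ≠ 'D') : leadD l = d := by
  have h1 : ¬ leadD l < d := fun h => leadD_stop l (by omega) (hall _ h)
  have h2 : ¬ d < leadD l := by
    intro h
    rcases hstop with h' | h'
    · have := leadD_le l; omega
    · exact h' (leadD_all_D l d h)
  omega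

theorem getD_drop (l : List Char) (i j : Nat) :
    (l.drop i).getD j ' ' = l.getD (i + j) ' ' := by
  simp [List.getD_eq_getElem?_getD, List.getElem?_drop]

theorem scanRight_spec (cs : List Char) (n r : Nat) (hr : r ≤ n) :
    r ≤ scanRight cs n r ∧ scanRight cs n r ≤ n ∧
    (∀ j, r ≤ j → j < scanRight cs n r → cs.getD j ' ' = 'D') ∧
    (scanRight cs n r = n ∨ cs.getD (scanRight cs n r) ' ' ≠ 'D') := by
  rw [scanRight]
  split
  · rename_i h
    obtain ⟨ih1, ih2, ih3, ih4⟩ := scanRight_spec cs n (r + 1) (by omega)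
    refine ⟨by omega, ih2, ?_, ih4⟩
    intro j hj1 hj2
    rcases Nat.eq_or_lt_of_le hj1 with rfl | hlt
    · exact h.2
    · exact ih3 j hlt hj2
  · rename_i h
    rw [Classical.not_and_iff_not_or_not] at h
    refine ⟨le_rfl, hr, by omega, ?_⟩
    rcases Nat.eq_or_lt_of_le hr with rfl | hlt
    · exact Or.inl rfl
    · rcases h with h | h
      · omega
      · exact Or.inr h
termination_by n - r
decreasing_by omega

theorem idSeg_cons (k n : Nat) (h : k ≤ n) :
    idSeg k n = ((k : Int) + 1) :: idSeg (k + 1) n := by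
  have e1 : n + 1 - k = (n - k) + 1 := by omega
  have e2 : n + 1 - (k + 1) = n - k := by omega
  rw [idSeg, e1, List.range'_succ, idSeg, e2]
  simp [mapInt]

theorem seg_zero (k : Nat) : seg k 0 = [(k : Int)] := by simp [seg, mapInt]

theorem length_seg (k d : Nat) : (seg k d).length = d + 1 := by simp [seg, mapInt]

theorem g_nil (k : Nat) : g k [] = [(k : Int)] := by
  rw [g]; simp [leadD, seg_zero]

-- splitting the identity suffix at the end of a D-run: idSeg k n = block ++ idSeg (k+d+1) n
theorem idSeg_split (k d n : Nat) (h : k + d ≤ n) :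
    idSeg k n = mapInt (List.range' (k + 1) (d + 1)) ++ idSeg (k + d + 1) n := by
  have h3 : List.range' (k + 1) (n + 1 - k) =
      List.range' (k + 1) (d + 1) ++ List.range' (k + d + 1 + 1) (n + 1 - (k + d + 1)) := by
    have e1 : n + 1 - k = (d + 1) + (n + 1 - (k + d + 1)) := by omega
    have e2 : k + d + 1 + 1 = (k + 1) + 1 * (d + 1) := by omega
    rw [e1, e2, List.range'_append]
  rw [idSeg, idSeg, h3, mapInt, mapInt, mapInt, List.map_append]

-- A's loop, started at k with the tail of res still the identity, computes g
theorem loopA_eq (cs : List Char) (n k : Nat) (hn : n = cs.length) (hk : k ≤ n)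
    (pre : List Int) (hpre : pre.length = k) :
    loopA cs n (pre ++ idSeg k n) k = pre ++ g (k + 1) (cs.drop k) := by
  rw [loopA]
  by_cases h : k < n
  · rw [dif_pos h]
    have hdrop_len : (cs.drop k).length = n - k := by simp [hn]
    have hgetD : ∀ j, (cs.drop k).getD j ' ' = cs.getD (k + j) ' ' := fun j => getD_drop cs k j
    by_cases hd : cs.getD k ' ' = 'D'
    · rw [dif_pos hd]
      -- D-run: reverse the segment up to right = scanRight cs n k
      obtain ⟨hs1, hs2, hs3, hs4⟩ := scanRight_spec cs n k (by omega)
      have hgt : k < scanRight cs n k := scanRight_gt cs n k h hd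
      set R := scanRight cs n k with hR
      set d : Nat := R - k with hdd
      have hRd : R = k + d := by omega
      -- leadD of the suffix is exactly d
      have hlead : leadD (cs.drop k) = d := by
        apply leadD_eq
        · omega
        · intro j hj
          rw [hgetD]
          exact hs3 (k + j) (by omega) (by omega)
        · rcases hs4 with h' | h'
          · left; omega
          · right; rw [hgetD]; rw [hRd] at h'; exact h'
      have hsplit : idSeg k n = mapInt (List.range' (k + 1) (d + 1)) ++ idSeg (k + d + 1) n :=
        idSeg_split k d n (by omega)
      -- compute the new res
      have hres' :
          PySem.List.slice (pre ++ idSeg k n) none (some (k : Int)) ++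
            (PySem.List.slice (pre ++ idSeg k n) (some (k : Int)) (some ((R + 1 : Nat) : Int))).reverse ++
            PySem.List.slice (pre ++ idSeg k n) (some ((R + 1 : Nat) : Int)) none =
          (pre ++ seg (k + 1) d) ++ idSeg (R + 1) n := by
        rw [PySem.List.slice_to_natCast, PySem.List.slice_natCast, PySem.List.slice_from_natCast,
          List.take_left' hpre, List.drop_left' hpre]
        have htake : (idSeg k n).take (R + 1 - k) = mapInt (List.range' (k + 1) (d + 1)) := by
          rw [hsplit]
          have e : R + 1 - k = (mapInt (List.range' (k + 1) (d + 1))).length := by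
            rw [length_mapInt]; simp; omega
          rw [e, List.take_left]
        have hdropR : (pre ++ idSeg k n).drop (R + 1) = idSeg (k + d + 1) n := by
          rw [hsplit, ← List.append_assoc]
          apply List.drop_left'
          simp [length_mapInt, hpre]; omega
        rw [htake, hdropR]
        have e2 : k + d + 1 = R + 1 := by omega
        rw [e2, seg]
      show loopA cs n
          (PySem.List.slice (pre ++ idSeg k n) none (some (k : Int)) ++
            (PySem.List.slice (pre ++ idSeg k n) (some (k : Int)) (some ((R + 1 : Nat) : Int))).reverse ++
            PySem.List.slice (pre ++ idSeg k n) (some ((R + 1 : Nat) : Int)) none) R =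
        pre ++ g (k + 1) (cs.drop k)
      rw [hres']
      by_cases hRn : R = n
      · -- run reaches the end of the string: loop terminates at i = R = n
        rw [loopA]
        rw [dif_neg (by omega)]
        have hnil : idSeg (R + 1) n = [] := by
          have e : n + 1 - (R + 1 + 1 - 1) = 0 := by omega
          simp [idSeg, mapInt]
          omega
        rw [hnil, List.append_nil]
        rw [g, hlead, hdrop_len]
        rw [if_pos (by omega)]
      · -- s[R] is not 'D': one more (non-D) step, then the induction hypothesis at R+1
        have hRlt : R < n := by omega
        have hRnd : cs.getD R ' ' ≠ 'D' := by
          rcases hs4 with h' | h'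
          · omega
          · exact h'
        rw [loopA]
        rw [dif_pos hRlt, dif_neg hRnd]
        have hlen3 : (pre ++ seg (k + 1) d).length = R + 1 := by
          simp [length_seg]; omega
        rw [loopA_eq cs n (R + 1) hn (by omega) (pre ++ seg (k + 1) d) hlen3]
        rw [List.append_assoc]
        congr 1
        -- g (k+1) (cs.drop k) = seg (k+1) d ++ g (R+2) (cs.drop (R+1))
        conv_rhs => rw [g]
        rw [hlead, hdrop_len]
        rw [if_neg (by omega)]
        rw [List.drop_drop]
        rw [show k + 1 + d + 1 = R + 1 + 1 by omega, show k + (d + 1) = R + 1 by omega]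
    · rw [dif_neg hd]
      -- s[k] is not 'D': step to k+1
      have hcons : idSeg k n = ((k : Int) + 1) :: idSeg (k + 1) n := idSeg_cons k n (by omega)
      have hstep : pre ++ idSeg k n = (pre ++ [(k : Int) + 1]) ++ idSeg (k + 1) n := by
        rw [hcons]; simp
      rw [hstep]
      rw [loopA_eq cs n (k + 1) hn (by omega) (pre ++ [(k : Int) + 1]) (by simp [hpre])]
      rw [List.append_assoc]
      congr 1
      -- g (k+1) (cs.drop k) = (k+1) :: g (k+2) (cs.drop (k+1))
      have hlead0 : leadD (cs.drop k) = 0 := by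
        have hne : (cs.drop k).getD 0 ' ' ≠ 'D' := by rw [hgetD]; simpa using hd
        exact leadD_eq _ _ (by omega) (by omega) (Or.inr hne)
      conv_rhs => rw [g]
      rw [hlead0, hdrop_len]
      rw [if_neg (by omega)]
      rw [List.drop_drop]
      rw [seg_zero, show k + 1 + 0 + 1 = k + 1 + 1 by omega, show k + (0 + 1) = k + 1 by omega]
      norm_num
  · -- k = n: loop over, res = pre ++ [n+1]
    rw [dif_neg h]
    have hkn : k = n := by omega
    subst hkn
    have h1 : idSeg k k = [(k : Int) + 1] := by
      have e : k + 1 - k = 1 := by omega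
      rw [idSeg, e]
      simp [mapInt, List.range'_succ]
    have h2 : cs.drop k = [] := by simp [hn]
    rw [h1, h2, g_nil]
    norm_num
termination_by n - k
decreasing_by
  · have := scanRight_gt cs n k ‹_› ‹_›; omega
  · omega

-- popping the whole stack appends it (top first, i.e. head first) to res
theorem popAll_eq (res stack : List Int) : popAll res stack = res ++ stack := by
  induction stack generalizing res with
  | nil => simp [popAll]
  | cons x rest ih => rw [popAll, ih]; simp

-- pushing through a run of 'D' characters only grows the stack
theorem foldB_push (cs : List Char) (n : Nat) (m : Nat) :
    ∀ k st acc, (∀ j, j < m → k + j < n ∧ cs.getD (k + j) ' ' = 'D') →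
    (List.range' k m).foldl (stepB cs n) (acc, st) =
      (acc, (mapInt (List.range' (k + 1) m)).reverse ++ st) := by
  induction m with
  | zero => intro k st acc _; simp [mapInt]
  | succ m ih =>
    intro k st acc hall
    rw [List.range'_succ, List.foldl_cons]
    have h0 := hall 0 (by omega)
    have hstep : stepB cs n (acc, st) k = (acc, ((k : Int) + 1) :: st) := by
      rw [stepB]
      rw [if_neg]
      simp only [not_or, not_not]
      exact ⟨by omega, by simpa using h0.2⟩
    rw [hstep]
    have e : k + 1 * 1 = k + 1 := by omega
    rw [e]
    rw [ih (k + 1) (((k : Int) + 1) :: st) acc (fun j hj => by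
      have hj1 := hall (j + 1) (by omega)
      have e2 : k + 1 + j = k + (j + 1) := by omega
      exact ⟨by omega, by rw [e2]; exact hj1.2⟩)]
    rw [List.range'_succ]
    simp [mapInt, List.append_assoc]

-- B's fold, started at k with an empty stack, computes g
theorem foldB_eq (cs : List Char) (n k : Nat) (hn : n = cs.length) (hk : k ≤ n)
    (acc : List Int) :
    ((List.range' k (n + 1 - k)).foldl (stepB cs n) (acc, [])).1 = acc ++ g (k + 1) (cs.drop k) := by
  have hdrop_len : (cs.drop k).length = n - k := by simp [hn]
  have hgetD : ∀ j, (cs.drop k).getD j ' ' = cs.getD (k + j) ' ' := fun j => getD_drop cs k j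
  set d := leadD (cs.drop k) with hd
  have hdle : d ≤ n - k := by have := leadD_le (cs.drop k); omega
  -- split the index range: the d pushes, then the flush at k+d, then the rest
  have hsplitn : List.range' k (n + 1 - k) =
      List.range' k d ++ List.range' (k + d) ((n - k - d) + 1) := by
    have e1 : n + 1 - k = d + ((n - k - d) + 1) := by omega
    have e2 : k + d = k + 1 * d := by omega
    rw [e1, e2, List.range'_append]
  rw [hsplitn, List.foldl_append]
  rw [foldB_push cs n d k [] acc (fun j hj => by
    refine ⟨by omega, ?_⟩
    have := leadD_all_D (cs.drop k) j (by omega)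
    rwa [hgetD] at this)]
  rw [List.range'_succ, List.foldl_cons]
  -- the flush step at i = k + d
  have hflush : stepB cs n (acc, (mapInt (List.range' (k + 1) d)).reverse ++ []) (k + d) =
      (acc ++ seg (k + 1) d, []) := by
    rw [stepB]
    rw [if_pos]
    · simp only [popAll_eq]
      have e : seg (k + 1) d = (((k + d : Nat) : Int) + 1) :: (mapInt (List.range' (k + 1) d)).reverse := by
        rw [seg, List.range'_1_concat, mapInt, mapInt, List.map_append]
        simp
        ring
      rw [e]
      simp
    · by_cases hdn : d = n - k
      · left; omega
      · right
        have hlt : d < (cs.drop k).length := by omega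
        have := leadD_stop (cs.drop k) hlt
        rw [hgetD] at this
        rw [← hd] at this
        exact this
  rw [hflush]
  by_cases hdn : d = n - k
  · -- the run reached the end of the string: nothing left to fold
    have e : n - k - d = 0 := by omega
    rw [e]
    simp only [List.range'_zero, List.foldl_nil]
    rw [g, ← hd, hdrop_len]
    rw [if_pos (by omega)]
  · -- continue at k + d + 1 with the induction hypothesis
    have e : List.range' (k + d + 1) (n - k - d) = List.range' (k + d + 1) (n + 1 - (k + d + 1)) := by
      congr 1; omega
    have e3 : k + d + 1 * 1 = k + d + 1 := by omega
    rw [e3, e]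
    rw [foldB_eq cs n (k + d + 1) hn (by omega) (acc ++ seg (k + 1) d)]
    rw [List.append_assoc]
    congr 1
    conv_rhs => rw [g]
    rw [← hd, hdrop_len]
    rw [if_neg (by omega)]
    rw [List.drop_drop]
    rw [show k + 1 + d + 1 = k + d + 1 + 1 by omega, show k + (d + 1) = k + d + 1 by omega]
termination_by n - k
decreasing_by omega

-- A's initial res is idSeg 0 n
theorem pyRange_eq_idSeg (n : Nat) :
    PySem.List.pyRange 1 ((n + 2 : Nat) : Int) 1 = idSeg 0 n := by
  rw [PySem.List.pyRange_one]
  have e1 : (((n + 2 : Nat) : Int) - 1).toNat = n + 1 := by omega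
  have e2 : n + 1 - 0 = n + 1 := by omega
  rw [e1, idSeg, e2, List.range'_eq_map_range, mapInt, List.map_map]
  apply List.map_congr_left
  intro a _
  simp

-- ===== VERDICT (by name: the statement is the Claim_ definition above) =====
theorem findPermutation_spec : Claim_equal_findPermutation := by
  unfold Claim_equal_findPermutation
  intro s _
  unfold Spec_findPermutation findPermutation findPermutation_alt
  show loopA s.toList s.toList.length
      (PySem.List.pyRange 1 ((s.toList.length + 2 : Nat) : Int) 1) 0 =
    ((List.range (s.toList.length + 1)).foldl (stepB s.toList s.toList.length) ([], [])).1
  rw [pyRange_eq_idSeg]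
  have hA := loopA_eq s.toList s.toList.length 0 rfl (by omega) [] rfl
  simp only [List.nil_append, List.drop_zero] at hA
  rw [hA]
  rw [List.range_eq_range']
  have hB := foldB_eq s.toList s.toList.length 0 rfl (by omega) []
  simp only [Nat.sub_zero, List.nil_append, List.drop_zero] at hB
  rw [hB]
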